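-- pv_equiv track=rewrite | github.com/ops324/happy-to-chat-bench-simulation | compare_conditions.py | cumulative_unique_pairs
-- ===== SOURCE A (Python) =====
-- from collections import Counter, defaultdict
--
-- def cumulative_unique_pairs(messages: list[dict]) -> dict[int, int]:
--     seen: set[frozenset] = set()
--     result: dict[int, int] = {}
--     by_step = defaultdict(list)
--     for m in messages:
--         by_step[m["step"]].append(m)
--     for step in sorted(by_step):
--         for m in by_step[step]:
--             seen.add(frozenset({m["from"], m["to"]}))
--         result[step] = len(seen)
--     return result
-- ===== SOURCE B (Python) =====
-- def cumulative_unique_pairs(messages: list[dict]) -> dict[int, int]: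
--     # Closed-form per step: the cumulative count at step s is just the number of
--     # distinct pairs among all messages whose step is <= s.  No bucket index,
--     # no running accumulator.
--     steps = sorted({m["step"] for m in messages})
--     return {s: len({frozenset((m["from"], m["to"])) for m in messages if m["step"] <= s})
--             for s in steps}
-- ===== Notes on version B (the rewrite author's own statement) =====
-- stated objective: simpler
-- what changed: Drops A's defaultdict bucket index and running 'seen' accumulator: B is a closed-form dict comprehension that, for each sorted distinct step s, counts the distinct {from,to} pairs among messages with step <= s.
import Mathlib
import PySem

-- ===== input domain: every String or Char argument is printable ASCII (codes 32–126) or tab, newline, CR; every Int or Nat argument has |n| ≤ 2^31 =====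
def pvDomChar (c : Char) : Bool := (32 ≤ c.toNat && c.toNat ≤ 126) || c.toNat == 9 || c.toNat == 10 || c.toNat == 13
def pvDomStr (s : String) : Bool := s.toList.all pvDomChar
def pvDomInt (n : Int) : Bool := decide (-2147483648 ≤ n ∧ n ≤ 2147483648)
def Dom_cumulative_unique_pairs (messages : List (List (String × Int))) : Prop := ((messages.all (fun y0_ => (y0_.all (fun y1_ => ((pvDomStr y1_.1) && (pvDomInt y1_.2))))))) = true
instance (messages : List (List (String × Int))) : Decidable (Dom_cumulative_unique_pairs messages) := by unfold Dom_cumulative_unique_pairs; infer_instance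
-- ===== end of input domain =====

-- B replaces A's defaultdict-bucket pass + running seen-set with a closed-form comprehension
-- over the sorted distinct steps (simpler decomposition; not claimed faster).
-- A frozenset {from, to} is encoded exactly as the canonical ordered pair (min, max):
-- two such frozensets are equal iff the canonical pairs are, so set membership/len are exact.

-- ===== PORT A =====
-- m["step"] etc.: first-match association-list lookup; the .getD 0 default is never
-- reached under Pre_ (Python raises KeyError exactly where get? is none).
def pvStep (m : List (String × Int)) : Int := ((PySem.Dict.mk m).get? "step").getD 0

def pvPair (m : List (String × Int)) : Int × Int :=
  let a := ((PySem.Dict.mk m).get? "from").getD 0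
  let b := ((PySem.Dict.mk m).get? "to").getD 0
  if a ≤ b then (a, b) else (b, a)

def cumulative_unique_pairs (messages : List (List (String × Int))) : List (Int × Int) :=
  -- by_step = defaultdict(list); for m in messages: by_step[m["step"]].append(m)
  let by_step : PySem.Dict Int (List (List (String × Int))) :=
    messages.foldl (fun d m => d.insert (pvStep m) (d.getD (pvStep m) [] ++ [m])) ⟨[]⟩
  -- for step in sorted(by_step): …
  let steps := PySem.List.sorted by_step.keys (fun x => x) false
  let fin := steps.foldl
      (fun (st : PySem.Set (Int × Int) × PySem.Dict Int Int) step =>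
        let seen := (by_step.getD step []).foldl (fun s m => PySem.Set.add s (pvPair m)) st.1
        (seen, st.2.insert step (PySem.Set.len seen)))
      (PySem.Set.empty, ⟨[]⟩)
  fin.2.items

-- ===== PORT B =====
def cumulative_unique_pairs_alt (messages : List (List (String × Int))) : List (Int × Int) :=
  -- steps = sorted({m["step"] for m in messages})
  let steps := PySem.List.sorted (PySem.Set.ofList (messages.map pvStep)) (fun x => x) false
  -- {s: len({frozenset((m["from"], m["to"])) for m in messages if m["step"] <= s}) for s in steps}
  steps.map (fun s =>
    (s, PySem.Set.len (PySem.Set.ofList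
          ((messages.filter (fun m => decide (pvStep m ≤ s))).map pvPair))))

-- ===== PRECONDITION & SPEC =====
-- Pre_ excludes exactly the inputs where the Python raises KeyError: some message
-- missing one of the keys "step", "from", "to" (both A and B raise there).
def Pre_cumulative_unique_pairs (messages : List (List (String × Int))) : Prop :=
  ∀ m ∈ messages, (PySem.Dict.mk m).contains "step" = true ∧
    (PySem.Dict.mk m).contains "from" = true ∧ (PySem.Dict.mk m).contains "to" = true
instance (messages : List (List (String × Int))) : Decidable (Pre_cumulative_unique_pairs messages) := by
  unfold Pre_cumulative_unique_pairs; infer_instance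

def pvWitness_cumulative_unique_pairs : (List (List (String × Int))) :=
  [[("step", 1), ("from", 2), ("to", 3)], [("step", 0), ("from", 3), ("to", 2)]]

def Spec_cumulative_unique_pairs (messages : List (List (String × Int))) (out : List (Int × Int)) : Prop := out = cumulative_unique_pairs_alt messages
instance (messages : List (List (String × Int))) (out : List (Int × Int)) : Decidable (Spec_cumulative_unique_pairs messages out) := by unfold Spec_cumulative_unique_pairs; infer_instance

-- ===== CLAIM (what is proved, stated in full; the proofs are below) =====
def Claim_equal_cumulative_unique_pairs : Prop := ∀ (messages : List (List (String × Int))), Dom_cumulative_unique_pairs messages → Pre_cumulative_unique_pairs messages → Spec_cumulative_unique_pairs messages (cumulative_unique_pairs messages)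

-- ===== LEMMAS AND PROOFS =====

-- A's defaultdict build, named for the lemmas below.
def pvBuild (messages : List (List (String × Int))) : PySem.Dict Int (List (List (String × Int))) :=
  messages.foldl (fun d m => d.insert (pvStep m) (d.getD (pvStep m) [] ++ [m])) ⟨[]⟩

-- B's per-step entry, named for the lemmas below.
def pvEntry (messages : List (List (String × Int))) (s : Int) : Int × Int :=
  (s, PySem.Set.len (PySem.Set.ofList
        ((messages.filter (fun m => decide (pvStep m ≤ s))).map pvPair)))

lemma go_getD : ∀ (ms : List (List (String × Int))) (d : PySem.Dict Int (List (List (String × Int)))) (s : Int),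
    (ms.foldl (fun d m => d.insert (pvStep m) (d.getD (pvStep m) [] ++ [m])) d).getD s []
      = d.getD s [] ++ ms.filter (fun m => pvStep m == s) := by
  intro ms
  induction ms with
  | nil => intro d s; simp
  | cons m t ih =>
    intro d s
    simp only [List.foldl_cons, ih, List.filter_cons]
    by_cases h : pvStep m = s
    · simp [h]
    · simp [h, PySem.Dict.getD_insert, Ne.symm h]

lemma go_keys : ∀ (ms : List (List (String × Int))) (d : PySem.Dict Int (List (List (String × Int)))),
    (ms.foldl (fun d m => d.insert (pvStep m) (d.getD (pvStep m) [] ++ [m])) d).keys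
      = ms.foldl (fun ks m => PySem.Set.add ks (pvStep m)) d.keys := by
  intro ms
  induction ms with
  | nil => intro d; simp
  | cons m t ih =>
    intro d
    simp only [List.foldl_cons, ih]
    congr 1
    by_cases h : pvStep m ∈ d.keys
    · rw [PySem.Dict.keys_insert_of_contains _ _ (by exact (PySem.Dict.contains_iff_mem_keys _ _).mpr h),
          PySem.Set.add_of_mem h]
    · rw [PySem.Dict.keys_insert_of_not_contains _ _ (by
          cases hc : (d.contains (pvStep m)) with
          | false => rfl
          | true => exact absurd ((PySem.Dict.contains_iff_mem_keys _ _).mp hc) h),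
          PySem.Set.add_of_not_mem h]

lemma keys_final (messages : List (List (String × Int))) :
    (messages.foldl (fun d m => d.insert (pvStep m) (d.getD (pvStep m) [] ++ [m])) (⟨[]⟩ : PySem.Dict Int (List (List (String × Int))))).keys
      = PySem.Set.ofList (messages.map pvStep) := by
  rw [go_keys]
  rw [← PySem.Set.update_map_eq_foldl_add]
  show PySem.Set.update ((⟨[]⟩ : PySem.Dict Int (List (List (String × Int)))).keys) _ = _
  rw [show ((⟨[]⟩ : PySem.Dict Int (List (List (String × Int)))).keys) = [] from rfl]
  exact PySem.Set.update_nil_left _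

lemma pv_loop (messages : List (List (String × Int))) :
    ∀ (todo done : List Int) (seen : PySem.Set (Int × Int)) (res : PySem.Dict Int Int),
      done ++ todo = PySem.List.sorted (PySem.Set.ofList (messages.map pvStep)) (fun x => x) false →
      seen.Nodup →
      (∀ x, x ∈ seen ↔ ∃ m ∈ messages, pvStep m ∈ done ∧ pvPair m = x) →
      res.items = done.map (pvEntry messages) →
      res.keys = done →
      (todo.foldl
        (fun (st : PySem.Set (Int × Int) × PySem.Dict Int Int) step =>
          let seen := ((pvBuild messages).getD step []).foldl (fun s m => PySem.Set.add s (pvPair m)) st.1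
          (seen, st.2.insert step (PySem.Set.len seen)))
        (seen, res)).2.items = done.map (pvEntry messages) ++ todo.map (pvEntry messages) := by
  intro todo
  induction todo with
  | nil => intro done seen res _ _ _ hres _; simpa using hres
  | cons s t ih =>
    intro done seen res hsplit hnd hmem hres hkeys
    have hpw : (done ++ s :: t).Pairwise (· < ·) := by
      rw [hsplit]; exact PySem.List.sorted_ofList_pairwise_lt _
    have hdone_lt : ∀ a ∈ done, a < s := by
      intro a ha
      exact (List.pairwise_append.mp hpw).2.2 a ha s (by simp)
    have ht_gt : ∀ b ∈ t, s < b := by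
      have := (List.pairwise_append.mp hpw).2.1
      exact fun b hb => (List.pairwise_cons.mp this).1 b hb
    have hsnotdone : s ∉ done := fun h => lt_irrefl s (hdone_lt s h)
    -- the bucket for s
    have hbucket : (pvBuild messages).getD s [] = messages.filter (fun m => pvStep m == s) := by
      have := go_getD messages (⟨[]⟩ : PySem.Dict Int (List (List (String × Int)))) s
      simpa [pvBuild] using this
    -- seen'
    set seen' := ((pvBuild messages).getD s []).foldl (fun st m => PySem.Set.add st (pvPair m)) seen with hseen'
    have hseen'_eq : seen' = PySem.Set.update seen ((messages.filter (fun m => pvStep m == s)).map pvPair) := by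
      rw [hseen', hbucket, PySem.Set.update_map_eq_foldl_add]
    have hnd' : seen'.Nodup := by rw [hseen'_eq]; exact PySem.Set.nodup_update _ _ hnd
    have hmem' : ∀ x, x ∈ seen' ↔ ∃ m ∈ messages, pvStep m ∈ done ++ [s] ∧ pvPair m = x := by
      intro x
      rw [hseen'_eq, PySem.Set.mem_update]
      constructor
      · rintro (hx | hx)
        · obtain ⟨m, hm, hd, hp⟩ := (hmem x).mp hx
          exact ⟨m, hm, by simp [hd], hp⟩
        · simp only [List.mem_map, List.mem_filter] at hx
          obtain ⟨m, ⟨hm, hs⟩, hp⟩ := hx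
          exact ⟨m, hm, by simp [eq_of_beq hs], hp⟩
      · rintro ⟨m, hm, hd, hp⟩
        rcases List.mem_append.mp hd with h | h
        · exact Or.inl ((hmem x).mpr ⟨m, hm, h, hp⟩)
        · refine Or.inr ?_
          simp only [List.mem_singleton] at h
          exact List.mem_map.mpr ⟨m, List.mem_filter.mpr ⟨hm, by simp [h]⟩, hp⟩
    -- membership in allSteps
    have hmemsteps : ∀ m ∈ messages, pvStep m ∈ done ++ s :: t := by
      intro m hm
      rw [hsplit, PySem.List.mem_sorted, PySem.Set.mem_ofList]
      exact List.mem_map.mpr ⟨m, hm, rfl⟩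
    have hiff : ∀ m ∈ messages, (pvStep m ∈ done ++ [s] ↔ pvStep m ≤ s) := by
      intro m hm
      constructor
      · intro h
        rcases List.mem_append.mp h with h | h
        · exact le_of_lt (hdone_lt _ h)
        · simp only [List.mem_singleton] at h; omega
      · intro h
        rcases List.mem_append.mp (hmemsteps m hm) with h2 | h2
        · exact List.mem_append.mpr (Or.inl h2)
        · rcases List.mem_cons.mp h2 with h2 | h2
          · simp [h2]
          · exact absurd h (not_le.mpr (ht_gt _ h2))
    -- len seen' = B's entry value
    have hlen : PySem.Set.len seen' = (pvEntry messages s).2 := by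
      have hndB : (PySem.Set.ofList ((messages.filter (fun m => decide (pvStep m ≤ s))).map pvPair)).Nodup :=
        PySem.Set.nodup_ofList _
      have hmemB : ∀ x, x ∈ seen' ↔ x ∈ PySem.Set.ofList ((messages.filter (fun m => decide (pvStep m ≤ s))).map pvPair) := by
        intro x
        rw [hmem' x, PySem.Set.mem_ofList]
        simp only [List.mem_map, List.mem_filter, decide_eq_true_eq]
        constructor
        · rintro ⟨m, hm, hd, hp⟩; exact ⟨m, ⟨hm, (hiff m hm).mp hd⟩, hp⟩
        · rintro ⟨m, ⟨hm, hle⟩, hp⟩; exact ⟨m, hm, (hiff m hm).mpr hle, hp⟩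
      have hperm : seen'.Perm _ := (List.perm_ext_iff_of_nodup hnd' hndB).mpr hmemB
      simp only [pvEntry, PySem.Set.len]
      exact congrArg Int.ofNat hperm.length_eq
    -- res'
    have hcont : res.contains s = false := by
      cases hc : res.contains s with
      | false => rfl
      | true =>
        exact absurd (hkeys ▸ (PySem.Dict.contains_iff_mem_keys _ _).mp hc) hsnotdone
    have hres' : (res.insert s (PySem.Set.len seen')).items = (done ++ [s]).map (pvEntry messages) := by
      rw [PySem.Dict.items_insert_of_not_contains _ _ hcont, hres, hlen]
      simp [pvEntry]
    have hkeys' : (res.insert s (PySem.Set.len seen')).keys = done ++ [s] := by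
      rw [PySem.Dict.keys_insert_of_not_contains _ _ hcont, hkeys]
    have := ih (done ++ [s]) seen' (res.insert s (PySem.Set.len seen'))
      (by simpa using hsplit) hnd' hmem' hres' hkeys'
    simpa [List.foldl_cons] using this

-- ===== VERDICT (by name: the statement is the Claim_ definition above) =====
theorem cumulative_unique_pairs_spec : Claim_equal_cumulative_unique_pairs := by
  intro messages _ _
  show cumulative_unique_pairs messages = cumulative_unique_pairs_alt messages
  simp only [cumulative_unique_pairs, cumulative_unique_pairs_alt]
  rw [show (messages.foldl (fun d m => d.insert (pvStep m) (d.getD (pvStep m) [] ++ [m]))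
        (⟨[]⟩ : PySem.Dict Int (List (List (String × Int))))) = pvBuild messages from rfl,
      show (pvBuild messages).keys = PySem.Set.ofList (messages.map pvStep) from keys_final messages]
  have := pv_loop messages
    (PySem.List.sorted (PySem.Set.ofList (messages.map pvStep)) (fun x => x) false)
    [] PySem.Set.empty ⟨[]⟩ rfl List.nodup_nil (by simp [PySem.Set.empty]) rfl rfl
  simpa [pvEntry] using this
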